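-- pv_equiv track=rewrite | github.com/rehmat11872/Dockerize-Django-project | test.py | solution
-- ===== SOURCE A (Python) =====
-- def solution(m) -> int:
--     # Initialize a dictionary to store counts
--     count_map = {}
--     rows = len(m)
--
--     # Populate the count_map with elements from the first row
--     for num in m[0]:
--         count_map[num] = 1
--
--     # Update the count_map for the remaining rows
--     for i in range(1, rows):
--         row_set = set(m[i])  # Convert current row to set for faster lookup
--         for num in count_map:
--             if num in row_set:
--                 count_map[num] += 1
--
--     # Find the minimum element that exists in all rows
--     result = -1
--     for num, count in count_map.items():
--         if count == rows:
--             if result == -1 or num < result: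
--                 result = num
--
--     return result
-- ===== SOURCE B (Python) =====
-- def solution(m) -> int:
--     common = set(m[0])
--     for row in m[1:]:
--         common &= set(row)
--     return min(common) if common else -1
-- ===== Notes on version B (the rewrite author's own statement) =====
-- stated objective: simpler
-- what changed: A builds a per-candidate count map over the first row, increments counts with an inner scan over all map keys for every later row, and finally scans items for count==rows while tracking a minimum with a -1 sentinel; B instead keeps a single shrinking set of still-common values via set intersection per row and returns min() of the survivors (or -1 if none). (single pass over each row's set instead of a per-row scan of all candidate keys)
-- intended difference: When -1 is itself a common element, every common element is >= -1, and some other common element first appears in row 0 after -1's first appearance, A's -1 result sentinel is reset by the common -1 and A returns the minimum of the later-appearing common elements (e.g. 0 on [[-1,0],[0,-1]]) instead of the true minimum; B returns -1, the smallest common element, which is the intended value. — e.g. on solution([[-1, 0], [0, -1]]): A returns 0, B returns -1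
import Mathlib
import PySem

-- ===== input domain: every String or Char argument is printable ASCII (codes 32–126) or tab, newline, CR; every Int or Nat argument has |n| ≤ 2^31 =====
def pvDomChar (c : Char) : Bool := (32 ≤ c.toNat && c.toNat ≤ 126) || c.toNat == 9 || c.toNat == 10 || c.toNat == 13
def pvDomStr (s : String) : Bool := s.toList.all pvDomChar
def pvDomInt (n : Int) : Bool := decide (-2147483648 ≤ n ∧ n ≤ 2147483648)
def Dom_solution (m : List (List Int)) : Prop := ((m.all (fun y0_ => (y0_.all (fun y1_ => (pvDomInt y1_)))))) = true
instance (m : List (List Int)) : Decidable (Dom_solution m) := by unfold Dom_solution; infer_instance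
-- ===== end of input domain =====

-- B replaces A's per-candidate count map (and its count==rows scan) by a shrinking set
-- intersection followed by a single min(); objective: simpler.

-- ===== PORT A =====
def solution (m : List (List Int)) : Int :=
  let rows : Int := (m.length : Int)
  let countMap : PySem.Dict Int Int :=
    ((PySem.List.pyGet? m 0).getD []).foldl (fun d num => d.insert num 1) PySem.Dict.empty
  let countMap2 : PySem.Dict Int Int :=
    (PySem.List.pyRange 1 rows 1).foldl (fun d i =>
      let rowSet : PySem.Set Int := PySem.Set.ofList (PySem.List.pyGetD m i [])
      d.keys.foldl (fun d' num =>
        if rowSet.contains num then d'.modify num 0 (· + 1) else d') d) countMap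
  countMap2.items.foldl (fun result p =>
    if p.2 = rows then (if result = -1 ∨ p.1 < result then p.1 else result) else result) (-1)

-- ===== PORT B =====
def solution_alt (m : List (List Int)) : Int :=
  let common0 : PySem.Set Int := PySem.Set.ofList ((PySem.List.pyGet? m 0).getD [])
  let common : PySem.Set Int :=
    (PySem.List.slice m (some 1) none).foldl
      (fun c row => PySem.Set.inter c (PySem.Set.ofList row)) common0
  if common = [] then -1 else (PySem.List.min? common (fun x => x)).getD (-1)

-- ===== PRECONDITION & SPEC =====
-- Pre_ excludes only the empty matrix, on which A raises IndexError at m[0] (B raises there too).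
def Pre_solution (m : List (List Int)) : Prop := m ≠ []
instance (m : List (List Int)) : Decidable (Pre_solution m) := by unfold Pre_solution; infer_instance
def pvWitness_solution : List (List Int) := [[1, 2], [2, 3]]

-- When -1 is itself a common element, every common element is ≥ -1, and some other common
-- element first appears in row 0 after -1's first appearance, A's result variable (whose -1
-- sentinel means "nothing found yet") is reset by the common -1 and A returns the minimum of
-- the common elements appearing later instead of the true minimum; B returns -1, the smallest
-- common element, which is the intended value.
def D_solution (m : List (List Int)) : Prop :=
  (∀ r ∈ m, (-1 : Int) ∈ r) ∧ (-1 : Int) ∈ m.headD [] ∧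
  (∀ c ∈ m.headD [], (∀ r ∈ m, c ∈ r) → (-1 : Int) ≤ c) ∧
  (∃ c ∈ (PySem.List.dedup (m.headD [])).drop
      ((PySem.List.dedup (m.headD [])).idxOf (-1) + 1), ∀ r ∈ m, c ∈ r)
instance (m : List (List Int)) : Decidable (D_solution m) := by unfold D_solution; infer_instance

def Spec_solution (m : List (List Int)) (out : Int) : Prop := ¬ D_solution m → out = solution_alt m
instance (m : List (List Int)) (out : Int) : Decidable (Spec_solution m out) := by unfold Spec_solution; infer_instance

def pvDiffWitness_solution : List (List Int) := [[-1, 0], [0, -1]]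
def pvDiffWitnessOut_solution : Int × Int := (0, -1)

-- ===== CLAIM (what is proved, stated in full; the proofs are below) =====
def Claim_unchanged_solution : Prop := ∀ (m : List (List Int)), Dom_solution m → Pre_solution m → Spec_solution m (solution m)
def Claim_changed_solution : Prop := Dom_solution (pvDiffWitness_solution) ∧ Pre_solution (pvDiffWitness_solution) ∧ D_solution (pvDiffWitness_solution) ∧ solution (pvDiffWitness_solution) = pvDiffWitnessOut_solution.1 ∧ solution_alt (pvDiffWitness_solution) = pvDiffWitnessOut_solution.2 ∧ pvDiffWitnessOut_solution.1 ≠ pvDiffWitnessOut_solution.2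
def Claim_exact_solution : Prop := ∀ (m : List (List Int)), Dom_solution m → Pre_solution m → D_solution m → solution m ≠ solution_alt m

-- ===== LEMMAS AND PROOFS =====

-- the Bool predicate "present in every remaining row"
def pvCommon (rest : List (List Int)) : Int → Bool := fun k => decide (∀ r ∈ rest, k ∈ r)
-- the list of common elements, in first-occurrence order of row 0
def pvC (r0 : List Int) (rest : List (List Int)) : List Int :=
  (PySem.Set.ofList r0).filter (pvCommon rest)
-- A's final-scan step
def pvG (r n : Int) : Int := if r = -1 ∨ n < r then n else r
-- B's final value on the common list
def pvMn (C : List Int) : Int := (PySem.List.min? C (fun x => x)).getD (-1)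

lemma getD_init (l : List Int) (d : PySem.Dict Int Int) (k : Int) :
    (l.foldl (fun d num => d.insert num 1) d).getD k 0 = if k ∈ l then 1 else d.getD k 0 := by
  induction l generalizing d with
  | nil => simp
  | cons x l ih =>
    simp only [List.foldl_cons, ih, PySem.Dict.getD_insert, List.mem_cons]
    by_cases hx : k = x <;> by_cases hl : k ∈ l <;> simp [hx, hl]

lemma inner_keys (row : List Int) (ks : List Int) (d : PySem.Dict Int Int)
    (hsub : ∀ x ∈ ks, x ∈ d.keys) :
    (ks.foldl (fun d' num =>
        if (PySem.Set.ofList row).contains num then d'.modify num 0 (· + 1) else d') d).keys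
      = d.keys := by
  induction ks generalizing d with
  | nil => simp
  | cons x ks ih =>
    simp only [List.foldl_cons]
    have hx : x ∈ d.keys := hsub x (by simp)
    have hkeys : ∀ f : Int → Int, (d.modify x 0 f).keys = d.keys := by
      intro f
      rw [PySem.Dict.keys_modify, PySem.Dict.keys_insert_of_contains]
      exact (PySem.Dict.contains_iff_mem_keys d x).2 hx
    by_cases hc : (PySem.Set.ofList row).contains x
    · rw [if_pos hc, ih _ (by intro y hy; rw [hkeys]; exact hsub y (by simp [hy]))]
      exact hkeys _
    · rw [if_neg hc]
      exact ih _ (fun y hy => hsub y (by simp [hy]))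

lemma inner_getD (row : List Int) (ks : List Int) (hnd : ks.Nodup) (d : PySem.Dict Int Int) (k : Int) :
    (ks.foldl (fun d' num =>
        if (PySem.Set.ofList row).contains num then d'.modify num 0 (· + 1) else d') d).getD k 0
      = d.getD k 0 + (if k ∈ ks ∧ k ∈ row then 1 else 0) := by
  induction ks generalizing d with
  | nil => simp
  | cons x ks ih =>
    obtain ⟨hx, hnd'⟩ := List.nodup_cons.1 hnd
    simp only [List.foldl_cons]
    have hmem : (PySem.Set.ofList row).contains x = true ↔ x ∈ row := by
      simp [PySem.Set.mem_ofList]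
    by_cases hc : (PySem.Set.ofList row).contains x
    · rw [if_pos hc, ih hnd', PySem.Dict.getD_modify]
      by_cases hkx : k = x
      · subst hkx
        have : k ∉ ks := hx
        simp [this, hmem.1 hc]
      · simp only [if_neg hkx, List.mem_cons]
        by_cases hks : k ∈ ks <;> simp [hks, hkx]
    · rw [if_neg hc, ih hnd']
      have hxr : x ∉ row := fun h => hc (hmem.2 h)
      by_cases hkx : k = x
      · subst hkx; simp [hxr, hx]
      · simp [List.mem_cons, hkx]

lemma outer_keys (rest : List (List Int)) (d : PySem.Dict Int Int) :
    (rest.foldl (fun d row =>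
        d.keys.foldl (fun d' num =>
          if (PySem.Set.ofList row).contains num then d'.modify num 0 (· + 1) else d') d) d).keys
      = d.keys := by
  induction rest generalizing d with
  | nil => rfl
  | cons row rest ih =>
    simp only [List.foldl_cons]
    rw [ih, inner_keys row d.keys d (fun x hx => hx)]

lemma outer_getD (rest : List (List Int)) (d : PySem.Dict Int Int) (hnd : d.keys.Nodup)
    (k : Int) (hk : k ∈ d.keys) :
    (rest.foldl (fun d row =>
        d.keys.foldl (fun d' num =>
          if (PySem.Set.ofList row).contains num then d'.modify num 0 (· + 1) else d') d) d).getD k 0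
      = d.getD k 0 + (rest.countP (fun r => decide (k ∈ r)) : Int) := by
  induction rest generalizing d with
  | nil => simp
  | cons row rest ih =>
    simp only [List.foldl_cons]
    have hkeys := inner_keys row d.keys d (fun x hx => hx)
    rw [ih _ (by rw [hkeys]; exact hnd) (by rw [hkeys]; exact hk),
        inner_getD row d.keys hnd d k, List.countP_cons]
    simp only [hk, true_and]
    by_cases hr : k ∈ row <;> simp [hr] <;> push_cast <;> ring

lemma foldl_fin (L : Int) (ks : List Int) (v : Int → Int) (p : Int → Bool)
    (h : ∀ k ∈ ks, (v k = L) ↔ p k = true) (acc : Int) :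
    (ks.map (fun k => (k, v k))).foldl (fun result q =>
        if q.2 = L then (if result = -1 ∨ q.1 < result then q.1 else result) else result) acc
      = (ks.filter p).foldl pvG acc := by
  induction ks generalizing acc with
  | nil => rfl
  | cons k ks ih =>
    simp only [List.map_cons, List.foldl_cons, List.filter_cons]
    by_cases hp : p k = true
    · rw [if_pos ((h k (by simp)).2 hp)]
      simp only [hp, if_true, List.foldl_cons]
      rw [ih (fun x hx => h x (by simp [hx]))]
      rfl
    · rw [if_neg (fun hv => hp ((h k (by simp)).1 hv))]
      simp only [hp]
      exact ih (fun x hx => h x (by simp [hx])) acc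

lemma solution_eq (r0 : List Int) (rest : List (List Int)) :
    solution (r0 :: rest) = (pvC r0 rest).foldl pvG (-1) := by
  unfold solution
  simp only []
  rw [show (PySem.List.pyGet? (r0 :: rest) 0).getD [] = r0 from by
    simp [PySem.List.pyGet?, PySem.List.pyIdx?]]
  have hloop : ∀ dinit : PySem.Dict Int Int,
      List.foldl (fun d i =>
        List.foldl (fun d' num =>
            if (PySem.Set.ofList (PySem.List.pyGetD (r0 :: rest) i [])).contains num then
              d'.modify num 0 (· + 1) else d') d d.keys)
        dinit (PySem.List.pyRange 1 ((r0 :: rest).length : Int))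
      = List.foldl (fun d row =>
          List.foldl (fun d' num =>
            if (PySem.Set.ofList row).contains num then
              d'.modify num 0 (· + 1) else d') d d.keys) dinit rest := by
    intro dinit
    have h := PySem.List.foldl_pyRange_pyGetD' (r0 :: rest) []
      (fun d row => List.foldl (fun d' num =>
          if (PySem.Set.ofList row).contains num then d'.modify num 0 (· + 1) else d') d d.keys)
      dinit (by norm_num : (0:Int) ≤ 1)
    simpa using h
  rw [hloop]
  have hk0 : (r0.foldl (fun d num => d.insert num (1:Int)) PySem.Dict.empty).keys
      = PySem.Set.ofList r0 := by
    have h := PySem.Dict.keys_foldl_insert r0 (fun _ _ => (1 : Int)) PySem.Dict.empty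
    simpa [PySem.Set.update_nil_left] using h
  have hnd0 : (r0.foldl (fun d num => d.insert num (1:Int)) PySem.Dict.empty).keys.Nodup := by
    rw [hk0]; exact PySem.Set.nodup_ofList r0
  have hFk : (rest.foldl (fun d row =>
      List.foldl (fun d' num =>
        if (PySem.Set.ofList row).contains num then d'.modify num (0:Int) (· + 1) else d') d d.keys)
      (r0.foldl (fun d num => d.insert num (1:Int)) PySem.Dict.empty)).keys = PySem.Set.ofList r0 := by
    rw [outer_keys, hk0]
  have hndF : (rest.foldl (fun d row =>
      List.foldl (fun d' num =>
        if (PySem.Set.ofList row).contains num then d'.modify num (0:Int) (· + 1) else d') d d.keys)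
      (r0.foldl (fun d num => d.insert num (1:Int)) PySem.Dict.empty)).keys.Nodup := by
    rw [hFk]; exact PySem.Set.nodup_ofList r0
  rw [PySem.Dict.items_eq_map_keys _ hndF (0 : Int), hFk]
  have hcond : ∀ k ∈ PySem.Set.ofList r0,
      ((rest.foldl (fun d row =>
        List.foldl (fun d' num =>
          if (PySem.Set.ofList row).contains num then d'.modify num (0:Int) (· + 1) else d') d d.keys)
        (r0.foldl (fun d num => d.insert num (1:Int)) PySem.Dict.empty)).getD k 0
        = ((r0 :: rest).length : Int)) ↔ pvCommon rest k = true := by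
    intro k hk
    rw [outer_getD rest _ hnd0 k (by rw [hk0]; exact hk), getD_init,
      if_pos ((PySem.Set.mem_ofList r0 k).1 hk)]
    have hle : rest.countP (fun r => decide (k ∈ r)) ≤ rest.length := List.countP_le_length
    simp only [pvCommon, List.length_cons]
    constructor
    · intro h
      have : rest.countP (fun r => decide (k ∈ r)) = rest.length := by
        push_cast at h; omega
      simpa using List.countP_eq_length.1 this
    · intro h
      have : rest.countP (fun r => decide (k ∈ r)) = rest.length :=
        List.countP_eq_length.2 (by simpa using h)
      rw [this]; push_cast; ring
  rw [foldl_fin (((r0 :: rest).length : Int)) (PySem.Set.ofList r0) _ (pvCommon rest) hcond (-1)]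
  rfl

lemma inter_fold (rest : List (List Int)) (s : List Int) :
    rest.foldl (fun c row => PySem.Set.inter c (PySem.Set.ofList row)) s
      = s.filter (pvCommon rest) := by
  induction rest generalizing s with
  | nil =>
    simp only [List.foldl_nil]
    have : pvCommon [] = fun _ => true := by funext k; simp [pvCommon]
    rw [this, List.filter_true]
  | cons row rest ih =>
    simp only [List.foldl_cons, ih]
    show (List.filter (fun x => (PySem.Set.ofList row).contains x) s).filter (pvCommon rest) = _
    rw [List.filter_filter]
    apply List.filter_congr
    intro x _
    simp [pvCommon, PySem.Set.mem_ofList, Bool.and_comm]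

lemma solution_alt_eq (r0 : List Int) (rest : List (List Int)) :
    solution_alt (r0 :: rest) = pvMn (pvC r0 rest) := by
  unfold solution_alt
  simp only [PySem.List.slice_from_one, List.tail_cons]
  have h0 : (PySem.List.pyGet? (r0 :: rest) 0).getD [] = r0 := by
    simp [PySem.List.pyGet?, PySem.List.pyIdx?]
  rw [h0, inter_fold rest (PySem.Set.ofList r0)]
  by_cases h : pvC r0 rest = []
  · rw [if_pos (by exact h), h]; rfl
  · rw [if_neg (by exact h)]; rfl

lemma mn_eq_of_lb (C : List Int) (a : Int) (ha : a ∈ C) (hlb : ∀ y ∈ C, a ≤ y) :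
    pvMn C = a := by
  unfold pvMn
  cases h : PySem.List.min? C (fun x => x) with
  | none => exact absurd ((PySem.List.min?_eq_none_iff C _).1 h ▸ ha) (List.not_mem_nil)
  | some mv =>
    have h1 : mv ≤ a := PySem.List.min?_isMin h a ha
    have h2 : a ≤ mv := hlb mv (PySem.List.min?_mem h)
    simp [le_antisymm h1 h2]

lemma foldG_no_neg_one (C : List Int) (r : Int) (hr : r ≠ -1) (hC : (-1 : Int) ∉ C) :
    C.foldl pvG r = C.foldl min r := by
  induction C generalizing r with
  | nil => rfl
  | cons x C ih =>
    have hx : x ≠ -1 := fun h => hC (by simp [h])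
    have hstep : pvG r x = min r x := by
      unfold pvG; rcases lt_trichotomy x r with h | h | h <;> simp [hr, h, min_def] <;> omega
    have : min r x ≠ -1 := by rcases min_choice r x with h | h <;> rw [h] <;> assumption
    simp only [List.foldl_cons, hstep, ih _ this (fun h => hC (by simp [h]))]

lemma foldG_lt (C : List Int) (r : Int) (hr : r < -1) :
    C.foldl pvG r = C.foldl min r := by
  induction C generalizing r with
  | nil => rfl
  | cons x C ih =>
    have hstep : pvG r x = min r x := by
      unfold pvG; rcases lt_trichotomy x r with h | h | h <;> simp [h, min_def] <;> omega
    have : min r x ≤ r := min_le_left _ _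
    simp only [List.foldl_cons, hstep, ih _ (lt_of_le_of_lt this hr)]

lemma foldG_init (C : List Int) (hC : (-1 : Int) ∉ C) :
    C.foldl pvG (-1) = pvMn C := by
  cases C with
  | nil => rfl
  | cons x C =>
    have hx : x ≠ -1 := fun h => hC (by simp [h])
    have h0 : pvG (-1) x = x := by unfold pvG; simp
    rw [List.foldl_cons, h0, foldG_no_neg_one C x hx (fun h => hC (by simp [h]))]
    unfold pvMn
    rw [PySem.List.min?_id_cons]
    rfl

lemma pvMn_lb (C : List Int) : ∀ y ∈ C, pvMn C ≤ y := by
  intro y hy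
  unfold pvMn
  cases h : PySem.List.min? C (fun x => x) with
  | none => exact absurd ((PySem.List.min?_eq_none_iff C _).1 h ▸ hy) (List.not_mem_nil)
  | some mv => simpa using PySem.List.min?_isMin h y hy

lemma pvMn_cases (C : List Int) : pvMn C = -1 ∨ pvMn C ∈ C := by
  unfold pvMn
  cases h : PySem.List.min? C (fun x => x) with
  | none => exact Or.inl rfl
  | some mv => exact Or.inr (by simpa using PySem.List.min?_mem h)

lemma pvMn_mem (C : List Int) (h : C ≠ []) : pvMn C ∈ C := by
  rcases pvMn_cases C with hc | hc
  · unfold pvMn at *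
    cases hm : PySem.List.min? C (fun x => x) with
    | none => exact absurd ((PySem.List.min?_eq_none_iff C _).1 hm) h
    | some mv => simpa using PySem.List.min?_mem hm
  · exact hc

lemma fold_split (C1 C2 : List Int) :
    (C1 ++ -1 :: C2).foldl pvG (-1) = C2.foldl pvG (pvG (C1.foldl pvG (-1)) (-1)) := by
  rw [List.foldl_append, List.foldl_cons]

lemma fold_vs_mn_eq (C1 C2 : List Int) (h1 : (-1 : Int) ∉ C1) (h2 : (-1 : Int) ∉ C2)
    (h : ¬ ((∀ c ∈ C1 ++ -1 :: C2, (-1 : Int) ≤ c) ∧ C2 ≠ [])) :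
    (C1 ++ -1 :: C2).foldl pvG (-1) = pvMn (C1 ++ -1 :: C2) := by
  rw [fold_split, foldG_init C1 h1]
  set r1 := pvMn C1 with hr1
  have hlbC1 : ∀ y ∈ C1, r1 ≤ y := pvMn_lb C1
  by_cases hlt : r1 < -1
  · -- r1 < -1 : behaves as plain min throughout
    have hg : pvG r1 (-1) = r1 := by
      unfold pvG; rw [if_neg (by omega : ¬(r1 = -1 ∨ (-1:Int) < r1))]
    rw [hg, foldG_lt C2 r1 hlt]
    have hr1mem : r1 ∈ C1 := by
      rcases pvMn_cases C1 with hc | hc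
      · omega
      · exact hc
    have hmm := PySem.List.foldl_min_le C2 r1
    refine (mn_eq_of_lb _ _ ?_ ?_).symm
    · rcases PySem.List.foldl_min_mem C2 r1 with hc | hc
      · rw [hc]; exact List.mem_append_left _ hr1mem
      · exact List.mem_append_right _ (List.mem_cons_of_mem _ hc)
    · intro y hy
      rcases List.mem_append.1 hy with hy | hy
      · exact le_trans hmm.1 (hlbC1 y hy)
      · rcases List.mem_cons.1 hy with rfl | hy
        · exact le_trans hmm.1 (le_of_lt hlt)
        · exact hmm.2 y hy
  · -- r1 ≥ -1 : the -1 resets the accumulator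
    have hg : pvG r1 (-1) = -1 := by
      unfold pvG; rw [if_pos (by omega : (r1 = -1 ∨ (-1:Int) < r1))]
    rw [hg, foldG_init C2 h2]
    by_cases hC2 : C2 = []
    · subst hC2
      have : pvMn ([] : List Int) = -1 := rfl
      rw [this]
      refine (mn_eq_of_lb _ _ ?_ ?_).symm
      · exact List.mem_append_right _ (List.mem_cons_self)
      · intro y hy
        rcases List.mem_append.1 hy with hy | hy
        · exact le_trans (by omega) (hlbC1 y hy)
        · rcases List.mem_cons.1 hy with rfl | hy
          · exact le_refl _
          · simp at hy
    · -- C2 ≠ [] so h gives a deep element c < -1, necessarily in C2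
      have hA : ¬ ∀ c ∈ C1 ++ -1 :: C2, (-1 : Int) ≤ c := fun hA => h ⟨hA, hC2⟩
      push_neg at hA
      obtain ⟨c, hc, hclt'⟩ := hA
      have hclt : c < -1 := by omega
      have hcC2 : c ∈ C2 := by
        rcases List.mem_append.1 hc with hy | hy
        · exact absurd (hlbC1 c hy) (by omega)
        · rcases List.mem_cons.1 hy with rfl | hy
          · omega
          · exact hy
      have hm2 : pvMn C2 ∈ C2 := pvMn_mem C2 hC2
      have hm2lt : pvMn C2 < -1 := lt_of_le_of_lt (pvMn_lb C2 c hcC2) hclt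
      refine (mn_eq_of_lb _ _ ?_ ?_).symm
      · exact List.mem_append_right _ (List.mem_cons_of_mem _ hm2)
      · intro y hy
        rcases List.mem_append.1 hy with hy | hy
        · exact le_trans (le_of_lt hm2lt) (le_trans (by omega) (hlbC1 y hy))
        · rcases List.mem_cons.1 hy with rfl | hy
          · exact le_of_lt hm2lt
          · exact pvMn_lb C2 y hy

lemma fold_vs_mn_ne (C1 C2 : List Int) (h1 : (-1 : Int) ∉ C1) (h2 : (-1 : Int) ∉ C2)
    (hge : ∀ c ∈ C1 ++ -1 :: C2, (-1 : Int) ≤ c) (hne : C2 ≠ []) :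
    (C1 ++ -1 :: C2).foldl pvG (-1) ≠ pvMn (C1 ++ -1 :: C2) := by
  rw [fold_split, foldG_init C1 h1]
  set r1 := pvMn C1 with hr1
  have hlt : ¬ r1 < -1 := by
    rcases pvMn_cases C1 with hc | hc
    · omega
    · have := hge r1 (List.mem_append_left _ hc); omega
  have hg : pvG r1 (-1) = -1 := by
    unfold pvG; rw [if_pos (by omega : (r1 = -1 ∨ (-1:Int) < r1))]
  rw [hg, foldG_init C2 h2]
  have hm2 : pvMn C2 ∈ C2 := pvMn_mem C2 hne
  have hm2ge : -1 ≤ pvMn C2 := hge _ (List.mem_append_right _ (List.mem_cons_of_mem _ hm2))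
  have hm2ne : pvMn C2 ≠ -1 := fun h => h2 (h ▸ hm2)
  have hBC : pvMn (C1 ++ -1 :: C2) = -1 := by
    refine mn_eq_of_lb _ _ ?_ ?_
    · exact List.mem_append_right _ (List.mem_cons_self)
    · exact hge
  rw [hBC]
  omega

lemma split_idxOf (s t : List Int) (hs : (-1 : Int) ∉ s) :
    ((s ++ -1 :: t).idxOf (-1)) = s.length ∧ (s ++ -1 :: t).drop (s.length + 1) = t := by
  constructor
  · induction s with
    | nil => exact List.idxOf_cons_self
    | cons x s ih =>
      have hx : x ≠ -1 := fun h => hs (by simp [h])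
      have hs' : (-1 : Int) ∉ s := fun h => hs (by simp [h])
      simp only [List.cons_append, List.idxOf_cons_ne _ hx, ih hs', List.length_cons]
  · rw [show s ++ -1 :: t = (s ++ [-1]) ++ t from by simp,
        show s.length + 1 = (s ++ [-1]).length from by simp, List.drop_left]

-- the decomposition of the common list at -1, shared by the two verdict proofs
lemma common_split (r0 : List Int) (rest : List (List Int))
    (hml : (-1 : Int) ∈ PySem.Set.ofList r0) (hp : pvCommon rest (-1) = true) :
    ∃ s t : List Int, PySem.Set.ofList r0 = s ++ -1 :: t ∧ (-1 : Int) ∉ s ∧ (-1 : Int) ∉ t ∧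
      pvC r0 rest = s.filter (pvCommon rest) ++ -1 :: t.filter (pvCommon rest) := by
  obtain ⟨s, t, hst⟩ := List.append_of_mem hml
  have hx := PySem.Set.nodup_ofList r0
  rw [hst, List.nodup_append] at hx
  refine ⟨s, t, hst, fun h => hx.2.2 (-1) h (-1) (by simp) rfl, (List.nodup_cons.1 hx.2.1).1, ?_⟩
  unfold pvC
  rw [hst, List.filter_append, List.filter_cons]
  simp [hp]

-- ===== VERDICT (by name: the statement is the Claim_ definition above) =====
theorem solution_spec : Claim_unchanged_solution := by
  intro m _hdom hpre
  unfold Spec_solution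
  intro hnd
  rcases m with _ | ⟨r0, rest⟩
  · exact absurd rfl hpre
  rw [solution_eq, solution_alt_eq]
  by_cases hm : (-1 : Int) ∈ pvC r0 rest
  · have hml : (-1 : Int) ∈ PySem.Set.ofList r0 := List.mem_of_mem_filter hm
    have hp : pvCommon rest (-1) = true := List.of_mem_filter hm
    obtain ⟨s, t, hst, hns, hnt, hCst⟩ := common_split r0 rest hml hp
    rw [hCst]
    refine fold_vs_mn_eq _ _ (fun h => hns (List.mem_of_mem_filter h))
      (fun h => hnt (List.mem_of_mem_filter h)) ?_
    rintro ⟨hall, hne⟩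
    apply hnd
    have hcommon : ∀ c, c ∈ r0 → (∀ r ∈ rest, c ∈ r) → c ∈ pvC r0 rest := by
      intro c hc hcr
      exact List.mem_filter.2 ⟨(PySem.Set.mem_ofList r0 c).2 hc, decide_eq_true hcr⟩
    refine ⟨?_, ?_, ?_, ?_⟩
    · intro r hr
      rcases List.mem_cons.1 hr with h | hr
      · exact h ▸ (PySem.Set.mem_ofList r0 (-1)).1 hml
      · exact of_decide_eq_true hp r hr
    · simpa using (PySem.Set.mem_ofList r0 (-1)).1 hml
    · intro c hc hcm
      have hcC : c ∈ pvC r0 rest :=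
        hcommon c (by simpa using hc) (fun r hr => hcm r (List.mem_cons_of_mem _ hr))
      rw [hCst] at hcC
      exact hall c hcC
    · simp only [List.headD_cons, PySem.List.dedup_eq_ofList, hst]
      rw [(split_idxOf s t hns).1, (split_idxOf s t hns).2]
      obtain ⟨c, hcmem⟩ := List.exists_mem_of_ne_nil _ hne
      obtain ⟨hct, hcp⟩ := List.mem_filter.1 hcmem
      refine ⟨c, hct, fun r hr => ?_⟩
      rcases List.mem_cons.1 hr with h | hr
      · exact h ▸ (PySem.Set.mem_ofList r0 c).1 (hst ▸ List.mem_append_right s (List.mem_cons_of_mem _ hct))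
      · exact of_decide_eq_true hcp r hr
  · exact foldG_init _ hm

theorem solution_changed : Claim_changed_solution := by
  unfold Claim_changed_solution; decide

theorem solution_tight : Claim_exact_solution := by
  intro m _hdom hpre hD
  rcases m with _ | ⟨r0, rest⟩
  · exact absurd rfl hpre
  obtain ⟨d1, d2, d3, d4⟩ := hD
  rw [solution_eq, solution_alt_eq]
  have hml : (-1 : Int) ∈ PySem.Set.ofList r0 := (PySem.Set.mem_ofList r0 (-1)).2 (by simpa using d2)
  have hp : pvCommon rest (-1) = true :=
    decide_eq_true (fun r hr => d1 r (List.mem_cons_of_mem _ hr))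
  obtain ⟨s, t, hst, hns, hnt, hCst⟩ := common_split r0 rest hml hp
  rw [hCst]
  refine fold_vs_mn_ne _ _ (fun h => hns (List.mem_of_mem_filter h))
    (fun h => hnt (List.mem_of_mem_filter h)) ?_ ?_
  · intro c hc
    rw [← hCst] at hc
    obtain ⟨hcl, hcp⟩ := List.mem_filter.1 hc
    refine d3 c (by simpa using (PySem.Set.mem_ofList r0 c).1 hcl) ?_
    intro r hr
    rcases List.mem_cons.1 hr with h | hr
    · exact h ▸ (by simpa using (PySem.Set.mem_ofList r0 c).1 hcl)
    · exact of_decide_eq_true hcp r hr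
  · simp only [List.headD_cons, PySem.List.dedup_eq_ofList, hst] at d4
    rw [(split_idxOf s t hns).1, (split_idxOf s t hns).2] at d4
    obtain ⟨c, hct, hcm⟩ := d4
    exact List.ne_nil_of_mem (List.mem_filter.2
      ⟨hct, decide_eq_true (fun r hr => hcm r (List.mem_cons_of_mem _ hr))⟩)
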